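-- pv_equiv track=rewrite | github.com/sveneggimann/SNIP | Python_Files/SNIP_functions.py | adForceCriteria
-- ===== SOURCE A (Python) =====
-- def adForceCriteria(nodes, allNodesToAddToPN):
--     '''
--     This function adds the force criteria.
--     Input:
--     nodes      -    All nodes
--     allNodesToAddToPN   -    nodeList with IDs to remove force criteria
--
--     Output:
--     nodes    -    All nodes with updated force criteria
--
--     '''
--     for f in allNodesToAddToPN:
--         for z in f[1]:
--             for i in nodes:
--                 if z == i[0]:
--                     i[5] = 1        # Make that a connection is enforced (later in the EM)
--                     break
--     return nodes
-- ===== SOURCE B (Python) =====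
-- def adForceCriteria(nodes, allNodesToAddToPN):
--     # One indexed pass: collect all target ids into a set, then walk nodes once,
--     # flagging only the first node carrying each id (a `seen` set of ids already passed).
--     targets = set()
--     for f in allNodesToAddToPN:
--         targets.update(f[1])
--     if targets:
--         seen = set()
--         for i in nodes:
--             h = i[0]
--             if h in targets and h not in seen:
--                 i[5] = 1
--             seen.add(h)
--     return nodes
-- ===== Notes on version B (the rewrite author's own statement) =====
-- stated objective: faster
-- what changed: A repeatedly scans the whole node list once per target id (triple nested loop); B flattens all target ids into a set once and then makes a single pass over the nodes, flagging a node when its id is a target and no earlier node had the same id (reproducing A's first-match-only behaviour).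
-- outside the precondition, e.g. on adForceCriteria([[1, 0, 0, 0, 0, 0], []], [(0, [1])]): A returns [[1, 0, 0, 0, 0, 1], []], B raises IndexError
import Mathlib
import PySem

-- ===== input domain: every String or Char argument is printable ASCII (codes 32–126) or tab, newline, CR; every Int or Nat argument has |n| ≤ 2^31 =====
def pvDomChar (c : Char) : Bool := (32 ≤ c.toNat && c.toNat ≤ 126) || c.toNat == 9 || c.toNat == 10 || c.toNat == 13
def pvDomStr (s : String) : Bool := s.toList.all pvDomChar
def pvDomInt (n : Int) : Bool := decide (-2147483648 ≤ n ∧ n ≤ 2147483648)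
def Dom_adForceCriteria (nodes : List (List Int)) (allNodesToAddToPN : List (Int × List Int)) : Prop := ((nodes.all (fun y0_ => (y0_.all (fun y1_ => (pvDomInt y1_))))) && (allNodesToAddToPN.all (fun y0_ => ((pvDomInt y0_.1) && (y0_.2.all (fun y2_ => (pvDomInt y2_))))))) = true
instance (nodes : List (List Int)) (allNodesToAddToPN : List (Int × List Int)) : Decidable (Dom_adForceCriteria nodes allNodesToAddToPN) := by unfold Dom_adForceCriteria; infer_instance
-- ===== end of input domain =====

-- B replaces A's per-id rescans of the node list by one flattened target set and a single pass
-- over the nodes (objective: faster). Both Pythons mutate `nodes` in place and return it; the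
-- equivalence proved here is about the RETURN value only.

-- ===== PORT A =====
-- inner `for i in nodes: if z == i[0]: i[5] = 1; break`
def flagFirstA (z : Int) : List (List Int) → List (List Int)
  | [] => []
  | n :: rest =>
    match PySem.List.pyGet? n 0 with
    | some h => if z = h then PySem.List.pySetD n 5 1 :: rest else n :: flagFirstA z rest
    | none => n :: flagFirstA z rest   -- Python raises IndexError here (empty node); excluded by Pre_

def adForceCriteria (nodes : List (List Int)) (allNodesToAddToPN : List (Int × List Int)) : List (List Int) :=
  allNodesToAddToPN.foldl (fun acc f => f.2.foldl (fun acc2 z => flagFirstA z acc2) acc) nodes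

-- ===== PORT B =====
-- `targets = set(); for f in ...: targets.update(f[1])`
def bTargets (allNodesToAddToPN : List (Int × List Int)) : PySem.Set Int :=
  allNodesToAddToPN.foldl (fun t f => PySem.Set.update t f.2) PySem.Set.empty

-- `for i in nodes: h = i[0]; if h in targets and h not in seen: i[5] = 1; seen.add(h)`
def bLoop (targets : PySem.Set Int) (seen : PySem.Set Int) : List (List Int) → List (List Int)
  | [] => []
  | n :: rest =>
    let h := PySem.List.pyGetD n 0 0   -- Python `i[0]` raises on an empty node; excluded by Pre_
    (if targets.contains h && !(seen.contains h) then PySem.List.pySetD n 5 1 else n)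
      :: bLoop targets (PySem.Set.add seen h) rest

def adForceCriteria_alt (nodes : List (List Int)) (allNodesToAddToPN : List (Int × List Int)) : List (List Int) :=
  if (bTargets allNodesToAddToPN).isEmpty then nodes
  else bLoop (bTargets allNodesToAddToPN) PySem.Set.empty nodes

-- ===== PRECONDITION & SPEC =====
-- Pre_ excludes exactly the crash-risk shapes (IndexError in A or in B): an empty node while any
-- target id exists (B reads every node's id, A only those it scans, so Pre_ is slightly broader
-- than A's exact raise set there), and a node of length < 6 that is the first node carrying its
-- id when that id is a target (both Pythons raise on `i[5] = 1` there).
def Pre_adForceCriteria (nodes : List (List Int)) (allNodesToAddToPN : List (Int × List Int)) : Prop :=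
  (allNodesToAddToPN.flatMap Prod.snd ≠ [] → ∀ n ∈ nodes, n ≠ []) ∧
  (∀ i ∈ List.range nodes.length,
     ((nodes.take i).all (fun m => m.headI ≠ (nodes[i]!).headI) = true ∧
       (nodes[i]!).headI ∈ allNodesToAddToPN.flatMap Prod.snd) → 6 ≤ (nodes[i]!).length)
instance (nodes : List (List Int)) (allNodesToAddToPN : List (Int × List Int)) : Decidable (Pre_adForceCriteria nodes allNodesToAddToPN) := by unfold Pre_adForceCriteria; infer_instance

def pvWitness_adForceCriteria : List (List Int) × (List (Int × List Int)) :=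
  ([[1, 0, 0, 0, 0, 0], [2, 0, 0, 0, 0, 0]], [(0, [1])])

def Spec_adForceCriteria (nodes : List (List Int)) (allNodesToAddToPN : List (Int × List Int)) (out : List (List Int)) : Prop := out = adForceCriteria_alt nodes allNodesToAddToPN
instance (nodes : List (List Int)) (allNodesToAddToPN : List (Int × List Int)) (out : List (List Int)) : Decidable (Spec_adForceCriteria nodes allNodesToAddToPN out) := by unfold Spec_adForceCriteria; infer_instance

-- ===== CLAIM (what is proved, stated in full; the proofs are below) =====
def Claim_equal_adForceCriteria : Prop := ∀ (nodes : List (List Int)) (allNodesToAddToPN : List (Int × List Int)), Dom_adForceCriteria nodes allNodesToAddToPN → Pre_adForceCriteria nodes allNodesToAddToPN → Spec_adForceCriteria nodes allNodesToAddToPN (adForceCriteria nodes allNodesToAddToPN)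

-- ===== LEMMAS AND PROOFS =====

lemma pySetD_cons5 (a : Int) (t : List Int) :
    PySem.List.pySetD (a :: t) 5 1 = a :: t.set 4 1 := by
  simp [PySem.List.pySetD, PySem.List.pySet?, PySem.List.pyIdx?]
  split_ifs with h
  · simp
  · rw [List.set_eq_of_length_le (by omega)]; rfl

lemma foldl_flag_nil (zs : List Int) :
    zs.foldl (fun acc z => flagFirstA z acc) [] = [] := by
  induction zs with
  | nil => rfl
  | cons z zs ih => simpa [flagFirstA] using ih

lemma foldl_nested (allv : List (Int × List Int)) (nodes : List (List Int)) :
    allv.foldl (fun acc f => f.2.foldl (fun acc2 z => flagFirstA z acc2) acc) nodes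
      = (allv.flatMap Prod.snd).foldl (fun acc z => flagFirstA z acc) nodes := by
  induction allv generalizing nodes with
  | nil => rfl
  | cons f fs ih => simp [List.flatMap_cons, List.foldl_append, ih]

lemma flagA_cons_scan (zs : List Int) : ∀ (t : List Int) (a : Int) (rest : List (List Int)),
    zs.foldl (fun acc z => flagFirstA z acc) ((a :: t) :: rest)
      = (if a ∈ zs then a :: t.set 4 1 else a :: t)
          :: (zs.filter (fun z => z ≠ a)).foldl (fun acc z => flagFirstA z acc) rest := by
  induction zs with
  | nil => intro t a rest; simp
  | cons z zs ih =>
    intro t a rest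
    by_cases hz : z = a
    · subst hz
      have h1 : flagFirstA z ((z :: t) :: rest) = (z :: t.set 4 1) :: rest := by
        simp [flagFirstA, pySetD_cons5]
      simp only [List.foldl_cons, h1, ih (t.set 4 1) z rest, List.set_set]
      simp
    · have h1 : flagFirstA z ((a :: t) :: rest) = (a :: t) :: flagFirstA z rest := by
        simp [flagFirstA, hz]
      simp only [List.foldl_cons, h1, ih t a (flagFirstA z rest)]
      simp [hz, Ne.symm hz]

lemma main_scan : ∀ (nodes : List (List Int)) (zs : List Int) (targets seen : PySem.Set Int),
    (∀ n ∈ nodes, n ≠ []) →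
    (∀ z : Int, z ∈ zs ↔ (z ∈ targets ∧ z ∉ seen)) →
    zs.foldl (fun acc z => flagFirstA z acc) nodes = bLoop targets seen nodes := by
  intro nodes
  induction nodes with
  | nil => intro zs targets seen _ _; simpa [bLoop] using foldl_flag_nil zs
  | cons n rest ih =>
    intro zs targets seen hne hrel
    obtain ⟨a, t, rfl⟩ : ∃ a t, n = a :: t := by
      cases n with
      | nil => exact absurd rfl (hne [] (by simp))
      | cons a t => exact ⟨a, t, rfl⟩
    rw [flagA_cons_scan zs t a rest]
    have hset : PySem.List.pySetD (a :: t) 5 1 = a :: t.set 4 1 := pySetD_cons5 a t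
    have hcond : (a ∈ zs) ↔ (PySem.Set.contains targets a && !PySem.Set.contains seen a) = true := by
      simp [hrel a]
    have htail : (zs.filter (fun z => z ≠ a)).foldl (fun acc z => flagFirstA z acc) rest
        = bLoop targets (PySem.Set.add seen a) rest := by
      apply ih _ targets (PySem.Set.add seen a) (fun m hm => hne m (by simp [hm]))
      intro z
      constructor
      · intro hz
        have := List.of_mem_filter hz
        have hz' := (hrel z).1 (List.mem_of_mem_filter hz)
        refine ⟨hz'.1, ?_⟩
        intro hmem
        rcases (PySem.Set.mem_add seen a z).1 hmem with h | h
        · exact hz'.2 h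
        · simp [h] at this
      · rintro ⟨h1, h2⟩
        refine List.mem_filter.2 ⟨(hrel z).2 ⟨h1, fun hs => h2 ((PySem.Set.mem_add seen a z).2 (Or.inl hs))⟩, ?_⟩
        simp only [decide_eq_true_eq]
        intro hza
        exact h2 ((PySem.Set.mem_add seen a z).2 (Or.inr hza))
    simp only [bLoop, PySem.List.pyGetD_zero_cons, hset, htail]
    by_cases hmem : a ∈ zs
    · rw [if_pos hmem, if_pos (hcond.1 hmem)]
    · rw [if_neg hmem, if_neg (fun hb => hmem (hcond.2 hb))]

lemma mem_foldl_update (allv : List (Int × List Int)) : ∀ (s : PySem.Set Int) (z : Int),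
    z ∈ allv.foldl (fun t f => PySem.Set.update t f.2) s ↔ z ∈ s ∨ z ∈ allv.flatMap Prod.snd := by
  induction allv with
  | nil => intro s z; simp
  | cons f fs ih =>
    intro s z
    simp only [List.foldl_cons, ih, PySem.Set.mem_update, List.flatMap_cons, List.mem_append]
    tauto

lemma mem_bTargets (allv : List (Int × List Int)) (z : Int) :
    z ∈ bTargets allv ↔ z ∈ allv.flatMap Prod.snd := by
  unfold bTargets
  rw [mem_foldl_update]
  simp [PySem.Set.empty]

-- ===== VERDICT (by name: the statement is the Claim_ definition above) =====
theorem adForceCriteria_spec : Claim_equal_adForceCriteria := by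
  intro nodes allv _ hpre
  unfold Spec_adForceCriteria adForceCriteria adForceCriteria_alt
  rw [foldl_nested]
  by_cases hz : allv.flatMap Prod.snd = []
  · have hempty : (bTargets allv).isEmpty = true := by
      rw [List.isEmpty_iff, List.eq_nil_iff_forall_not_mem]
      intro z hzmem
      exact (List.ne_nil_of_mem ((mem_bTargets allv z).1 hzmem)) (by simp [hz])
    simp [hz, hempty]
  · have hnotempty : (bTargets allv).isEmpty = false := by
      rcases List.exists_mem_of_ne_nil _ hz with ⟨z, hzmem⟩
      have : z ∈ bTargets allv := (mem_bTargets allv z).2 hzmem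
      rcases List.isEmpty_eq_false_iff_exists_mem.2 ⟨z, this⟩ with h
      exact h
    rw [hnotempty]
    simp only [Bool.false_eq_true, if_false]
    apply main_scan nodes _ (bTargets allv) PySem.Set.empty (hpre.1 hz)
    intro z
    simp [mem_bTargets, PySem.Set.empty]
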